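-- pv_equiv track=rewrite | github.com/HongChan1412/Algorithm | 프로그래머스/1/12977. 소수 만들기/소수 만들기.py | solution
-- ===== SOURCE A (Python) =====
-- from itertools import combinations
--
-- def check_sosu(num: int):
--     if (num % 2 == 0) or (num % 3 == 0) or (num % 5 == 0):
--         return False
--     for i in range(7, num+1):
--         if i == num:
--             return True
--         if num % i == 0:
--             return False
--
-- def solution(nums):
--     answer = 0
--     answers = []
--     combies = list(combinations(nums, 3))
--     for combi in combies:
--         res = sum(combi)
--         if check_sosu(res):
--             answers.append(res)
--     answer = len(answers)
--     return answer
-- ===== SOURCE B (Python) =====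
-- def count_pairs_with(x, rest):
--     # pairs (y, z) taken in order from rest, recursing on the tail
--     if len(rest) < 2:
--         return 0
--     y, rest2 = rest[0], rest[1:]
--     here = sum(1 for z in rest2 if is_prime_sum(x + y + z))
--     return here + count_pairs_with(x, rest2)
--
-- def is_prime_sum(s):
--     # truthy exactly when s is a prime greater than 5
--     return s > 6 and s % 2 and s % 3 and s % 5 and all(s % d for d in range(7, s))
--
-- def solution(nums):
--     if len(nums) < 3:
--         return 0
--     x, rest = nums[0], nums[1:]
--     return count_pairs_with(x, rest) + solution(rest)
-- ===== Notes on version B (the rewrite author's own statement) =====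
-- stated objective: alternative
-- what changed: B replaces A's materialised combinations list + filtered append list + len by a structural recursion on the list (peel the head, count prime-sum pairs in the tail recursively, recurse on the tail) and replaces check_sosu's early-return loop by a direct 'prime greater than 5' test written as one boolean conjunction over range(7,s).
import Mathlib
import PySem

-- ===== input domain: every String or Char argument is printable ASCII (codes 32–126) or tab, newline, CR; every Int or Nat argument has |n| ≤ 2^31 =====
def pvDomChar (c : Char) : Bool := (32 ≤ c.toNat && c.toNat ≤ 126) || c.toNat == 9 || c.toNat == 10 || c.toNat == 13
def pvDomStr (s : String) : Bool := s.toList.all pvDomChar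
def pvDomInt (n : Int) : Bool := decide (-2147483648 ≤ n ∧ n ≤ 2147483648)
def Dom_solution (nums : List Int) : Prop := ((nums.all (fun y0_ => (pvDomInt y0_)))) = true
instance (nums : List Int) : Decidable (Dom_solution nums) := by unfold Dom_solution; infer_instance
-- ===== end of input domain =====

-- B replaces A's combinations-list + filtered-append-list + len by a structural recursion on the
-- list (peel the head, count prime-sum pairs in the tail, recurse) and replaces check_sosu's
-- early-return loop by a direct boolean conjunction over range(7,s) (objective: alternative).


-- ===== PORT A =====
-- itertools.combinations(nums, 2) / (nums, 3) in itertools order (library call, ported as a recursion)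
def pairs2 : List Int → List (Int × Int)
  | [] => []
  | x :: xs => xs.map (fun a => (x, a)) ++ pairs2 xs

def combos3 : List Int → List (Int × Int × Int)
  | [] => []
  | x :: xs => (pairs2 xs).map (fun p => (x, p.1, p.2)) ++ combos3 xs

-- 'for i in range(7, num+1)' with early returns; fuel = number of remaining iterations.
-- Falling off the loop end is Python's implicit 'return None' (falsy where check_sosu is used) → false.
def checkLoop (num : Int) : Nat → Int → Bool
  | 0, _ => false
  | fuel + 1, i =>
      if i = num then true
      else if PySem.Int.mod num i = 0 then false
      else checkLoop num fuel (i + 1)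

def check_sosu (num : Int) : Bool :=
  if PySem.Int.mod num 2 = 0 || PySem.Int.mod num 3 = 0 || PySem.Int.mod num 5 = 0 then false
  else checkLoop num (num + 1 - 7).toNat 7

def solution (nums : List Int) : Int :=
  let combies := combos3 nums
  let answers : List Int :=
    combies.foldl
      (fun answers combi =>
        let res := combi.1 + combi.2.1 + combi.2.2
        if check_sosu res then answers ++ [res] else answers) []
  let answer : Int := (answers.length : Int)
  answer

-- ===== PORT B =====
-- truthy exactly when s is a prime greater than 5 ('s % d' truthy = nonzero)
def is_prime_sum (s : Int) : Bool :=
  decide (6 < s) && (PySem.Int.mod s 2 ≠ 0) && (PySem.Int.mod s 3 ≠ 0) && (PySem.Int.mod s 5 ≠ 0)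
    && (PySem.List.pyRange 7 s 1).all (fun d => PySem.Int.mod s d ≠ 0)

-- pairs (y, z) taken in order from rest, recursing on the tail
def count_pairs_with (x : Int) : List Int → Int
  | [] => 0
  | [_] => 0
  | y :: rest2 => ((rest2.countP fun z => is_prime_sum (x + y + z)) : Int) + count_pairs_with x rest2

def solution_alt : List Int → Int
  | [] => 0
  | [_] => 0
  | [_, _] => 0
  | x :: rest => count_pairs_with x rest + solution_alt rest

-- ===== PRECONDITION & SPEC =====
def Spec_solution (nums : List Int) (out : Int) : Prop := out = solution_alt nums
instance (nums : List Int) (out : Int) : Decidable (Spec_solution nums out) := by unfold Spec_solution; infer_instance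

-- ===== CLAIM (what is proved, stated in full; the proofs are below) =====
def Claim_equal_solution : Prop := ∀ (nums : List Int), Dom_solution nums → Spec_solution nums (solution nums)

-- ===== LEMMAS AND PROOFS =====
def sumc (c : Int × Int × Int) : Int := c.1 + c.2.1 + c.2.2

-- A's loop over [7, num] with early returns: true iff the loop is entered and no divisor in [i, num).
lemma checkLoop_eq (num : Int) (n : Nat) (i : Int) (hi : i + n = num + 1) :
    checkLoop num n i
      = (decide (i ≤ num) && (PySem.List.pyRange i num 1).all (fun d => PySem.Int.mod num d ≠ 0)) := by
  induction n generalizing i with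
  | zero =>
    have hgt : ¬ i ≤ num := by omega
    simp [checkLoop, hgt]
  | succ n ih =>
    have hle : i ≤ num := by omega
    by_cases h : i = num
    · subst h
      simp [checkLoop]
    · have hlt : i < num := by omega
      rw [PySem.List.pyRange_one_cons hlt]
      simp only [checkLoop, if_neg h, List.all_cons]
      by_cases hm : PySem.Int.mod num i = 0
      · simp [hm, hle]
      · rw [if_neg hm, ih (i + 1) (by omega)]
        simp [hm, hle]
        omega

lemma check_sosu_eq (s : Int) : check_sosu s = is_prime_sum s := by
  unfold check_sosu is_prime_sum
  rw [PySem.Int.mod_eq_emod_of_pos (a := s) (b := 2) (by norm_num),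
      PySem.Int.mod_eq_emod_of_pos (a := s) (b := 3) (by norm_num),
      PySem.Int.mod_eq_emod_of_pos (a := s) (b := 5) (by norm_num)]
  by_cases h2 : s % 2 = 0
  · simp [h2]
  by_cases h3 : s % 3 = 0
  · simp [h2, h3]
  by_cases h5 : s % 5 = 0
  · simp [h2, h3, h5]
  by_cases hs : 6 < s
  · rw [checkLoop_eq s _ 7 (by omega)]
    simp [hs, h2, h3, h5, show (7:Int) ≤ s by omega]
  · have h0 : (s + 1 - 7).toNat = 0 := by omega
    rw [h0]
    simp [checkLoop, hs]

-- A as a countP over the combinations list.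
lemma solution_eq_countP (nums : List Int) :
    solution nums = (((combos3 nums).countP fun c => check_sosu (sumc c)) : Int) := by
  simp only [solution]
  rw [show (fun (answers : List Int) (combi : Int × Int × Int) =>
        if check_sosu (combi.1 + combi.2.1 + combi.2.2) then
          answers ++ [combi.1 + combi.2.1 + combi.2.2] else answers)
      = (fun (answers : List Int) combi =>
        if check_sosu (sumc combi) then answers ++ [sumc combi] else answers) from rfl]
  rw [PySem.List.foldl_append_if (fun c => check_sosu (sumc c)) sumc]
  simp [List.countP_eq_length_filter]

-- B's inner recursion counts over pairs2.
lemma count_pairs_with_eq (x : Int) (rest : List Int) :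
    count_pairs_with x rest = (((pairs2 rest).countP fun p => is_prime_sum (x + p.1 + p.2)) : Int) := by
  induction rest with
  | nil => simp [count_pairs_with, pairs2]
  | cons y r ih =>
    cases r with
    | nil => simp [count_pairs_with, pairs2]
    | cons z r2 =>
      have hmap : List.countP (fun p => is_prime_sum (x + p.1 + p.2))
            ((z :: r2).map (fun a => (y, a)))
          = List.countP (fun w => is_prime_sum (x + y + w)) (z :: r2) := by
        rw [List.countP_map]; rfl
      rw [show pairs2 (y :: z :: r2)
            = (z :: r2).map (fun a => (y, a)) ++ pairs2 (z :: r2) from rfl]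
      simp only [count_pairs_with, ih, List.countP_append, hmap]
      push_cast
      ring

-- B as a countP over the combinations list.
lemma solution_alt_eq_countP (nums : List Int) :
    solution_alt nums = (((combos3 nums).countP fun c => is_prime_sum (sumc c)) : Int) := by
  induction nums with
  | nil => simp [solution_alt, combos3]
  | cons x xs ih =>
    cases xs with
    | nil => simp [solution_alt, combos3, pairs2]
    | cons y ys =>
      cases ys with
      | nil => simp [solution_alt, combos3, pairs2]
      | cons z zs =>
        have hmap : List.countP (fun c => is_prime_sum (sumc c))
              ((pairs2 (y :: z :: zs)).map (fun p => (x, p.1, p.2)))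
            = List.countP (fun p => is_prime_sum (x + p.1 + p.2)) (pairs2 (y :: z :: zs)) := by
          rw [List.countP_map]; rfl
        rw [show combos3 (x :: y :: z :: zs)
              = (pairs2 (y :: z :: zs)).map (fun p => (x, p.1, p.2)) ++ combos3 (y :: z :: zs)
            from rfl]
        simp only [solution_alt, ih, count_pairs_with_eq, List.countP_append, hmap]
        push_cast
        ring

-- ===== VERDICT (by name: the statement is the Claim_ definition above) =====
theorem solution_spec : Claim_equal_solution := by
  intro nums _
  show solution nums = solution_alt nums
  rw [solution_eq_countP, solution_alt_eq_countP]
  congr 1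
  exact List.countP_congr (fun c _ => by rw [check_sosu_eq])
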